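-- pv_equiv track=rewrite | github.com/UCSD-SEELab/ENLACE2024 | ESS_test/visualizer.py | combine_timestamps
-- ===== SOURCE A (Python) =====
-- def combine_timestamps(target_timestamps, mistake_timestamps):
--     combined_timestamps = []
--     mistake_index = 0
--
--     for i in range(len(target_timestamps)):
--         combined_timestamps.append(target_timestamps[i])
--         if (i + 1) % 2 == 0 and mistake_index < len(mistake_timestamps):
--             combined_timestamps.append(mistake_timestamps[mistake_index])
--             mistake_index += 1
--
--     return combined_timestamps
-- ===== SOURCE B (Python) =====
-- def combine_timestamps(target_timestamps, mistake_timestamps):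
--     combined = []
--     t = 0
--     for mistake in mistake_timestamps:
--         if t + 2 > len(target_timestamps):
--             break
--         combined += target_timestamps[t:t+2]
--         combined.append(mistake)
--         t += 2
--     combined += target_timestamps[t:]
--     return combined
-- ===== Notes on version B (the rewrite author's own statement) =====
-- stated objective: alternative
-- what changed: B loops over the mistakes with a target cursor, copying target pairs by slicing and appending the remaining target tail once at the end, instead of A's index scan over all targets with a mistake counter and a per-index parity test.
import Mathlib
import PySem

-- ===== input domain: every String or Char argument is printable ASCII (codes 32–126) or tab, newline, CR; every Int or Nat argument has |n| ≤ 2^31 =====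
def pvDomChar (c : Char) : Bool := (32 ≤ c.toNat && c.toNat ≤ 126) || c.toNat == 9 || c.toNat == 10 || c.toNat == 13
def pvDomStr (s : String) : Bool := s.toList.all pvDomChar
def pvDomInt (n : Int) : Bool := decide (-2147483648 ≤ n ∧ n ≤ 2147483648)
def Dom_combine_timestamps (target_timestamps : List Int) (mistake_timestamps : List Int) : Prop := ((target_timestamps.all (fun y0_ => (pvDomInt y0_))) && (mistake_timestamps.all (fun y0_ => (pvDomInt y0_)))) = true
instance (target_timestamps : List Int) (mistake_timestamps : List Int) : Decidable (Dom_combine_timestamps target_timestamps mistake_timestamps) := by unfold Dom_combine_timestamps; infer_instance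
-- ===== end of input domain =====

-- B interleaves by looping over the mistakes with a target cursor (slice-copy pairs, append the
-- tail once) instead of A's index scan over targets with a mistake counter; alternative, same cost.


-- ===== PORT A =====
-- A's loop body: append target_timestamps[i]; if (i+1)%2==0 and mistake_index < len(mistakes),
-- also append mistakes[mistake_index] and bump the counter.  State = (combined, mistake_index).
def Astep (t m : List Int) (s : List Int × Nat) (i : Nat) : List Int × Nat :=
  let c := s.1 ++ [t.getD i 0]
  if (i + 1) % 2 = 0 ∧ s.2 < m.length then (c ++ [m.getD s.2 0], s.2 + 1) else (c, s.2)

def combine_timestamps (target_timestamps : List Int) (mistake_timestamps : List Int) : List Int :=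
  ((List.range target_timestamps.length).foldl (Astep target_timestamps mistake_timestamps) ([], 0)).1

-- ===== PORT B =====
-- B's loop: for each mistake, stop if the cursor has fewer than 2 targets left; otherwise copy
-- target[ti:ti+2] and the mistake; afterwards append target[ti:].
def Bloop (t : List Int) (ms : List Int) (acc : List Int) (ti : Nat) : List Int :=
  match ms with
  | [] => acc ++ PySem.List.slice t (some (ti : Int)) none
  | x :: rest =>
    if t.length < ti + 2 then acc ++ PySem.List.slice t (some (ti : Int)) none
    else Bloop t rest (acc ++ PySem.List.slice t (some (ti : Int)) (some ((ti : Int) + 2)) ++ [x]) (ti + 2)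

def combine_timestamps_alt (target_timestamps : List Int) (mistake_timestamps : List Int) : List Int :=
  Bloop target_timestamps mistake_timestamps [] 0

-- ===== PRECONDITION & SPEC =====
def Spec_combine_timestamps (target_timestamps : List Int) (mistake_timestamps : List Int) (out : List Int) : Prop := out = combine_timestamps_alt target_timestamps mistake_timestamps
instance (target_timestamps : List Int) (mistake_timestamps : List Int) (out : List Int) : Decidable (Spec_combine_timestamps target_timestamps mistake_timestamps out) := by unfold Spec_combine_timestamps; infer_instance

-- ===== CLAIM (what is proved, stated in full; the proofs are below) =====
def Claim_equal_combine_timestamps : Prop := ∀ (target_timestamps : List Int) (mistake_timestamps : List Int), Dom_combine_timestamps target_timestamps mistake_timestamps → Spec_combine_timestamps target_timestamps mistake_timestamps (combine_timestamps target_timestamps mistake_timestamps)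

-- ===== LEMMAS AND PROOFS =====

-- t[ti:ti+2] and t[ti:] as drop/take
theorem slice_pair (t : List Int) (ti : Nat) :
    PySem.List.slice t (some (ti : Int)) (some ((ti : Int) + 2)) = (t.drop ti).take 2 := by
  have h := PySem.List.slice_natCast_add t ti 2
  exact_mod_cast h

theorem slice_tail (t : List Int) (ti : Nat) :
    PySem.List.slice t (some (ti : Int)) none = t.drop ti :=
  PySem.List.slice_from_natCast t ti

-- one A-step from an arbitrary accumulator = the same step from [] prefixed by it
theorem Astep_frame (t m : List Int) (c : List Int) (k : Nat) (i : Nat) :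
    Astep t m (c, k) i = (c ++ (Astep t m ([], k) i).1, (Astep t m ([], k) i).2) := by
  simp only [Astep]
  split_ifs <;> simp

theorem foldl_frame (t m : List Int) (l : List Nat) :
    ∀ (c : List Int) (k : Nat),
      (List.range 0).foldl (Astep t m) ([], 0) = ([], 0) →
      l.foldl (Astep t m) (c, k)
        = (c ++ (l.foldl (Astep t m) ([], k)).1, (l.foldl (Astep t m) ([], k)).2) := by
  induction l with
  | nil => intro c k _; simp
  | cons i l ih =>
    intro c k htriv
    simp only [List.foldl_cons]
    rw [Astep_frame t m c k i]
    rcases h : Astep t m ([], k) i with ⟨w, k'⟩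
    rw [ih (c ++ w) k' htriv, ih w k' htriv]
    simp

theorem foldl_frame' (t m : List Int) (l : List Nat) (c : List Int) (k : Nat) :
    l.foldl (Astep t m) (c, k)
      = (c ++ (l.foldl (Astep t m) ([], k)).1, (l.foldl (Astep t m) ([], k)).2) :=
  foldl_frame t m l c k (by simp)

-- shifting the index window by 2 (targets) and 1 (mistakes)
theorem Ashift (a b x : Int) (T M : List Int) :
    ∀ (n j k : Nat),
      ((List.range' (j + 2) n).foldl (Astep (a :: b :: T) (x :: M)) ([], k + 1)).1
        = ((List.range' j n).foldl (Astep T M) ([], k)).1 := by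
  intro n
  induction n with
  | zero => intro j k; simp
  | succ n ih =>
    intro j k
    rw [List.range'_succ, List.range'_succ]
    simp only [List.foldl_cons]
    have hget : (a :: b :: T).getD (j + 2) 0 = T.getD j 0 := by
      simp [List.getD]
    have hpar : ((j + 2) + 1) % 2 = (j + 1) % 2 := by omega
    by_cases hc : (j + 1) % 2 = 0 ∧ k < M.length
    · have h1 : Astep (a :: b :: T) (x :: M) ([], k + 1) (j + 2)
          = ([T.getD j 0, M.getD k 0], k + 2) := by
        simp only [Astep, hget, hpar]
        rw [if_pos ⟨hc.1, by simp; omega⟩]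
        simp [List.getD]
      have h2 : Astep T M ([], k) j = ([T.getD j 0, M.getD k 0], k + 1) := by
        simp only [Astep]
        rw [if_pos hc]
        simp
      rw [h1, h2, foldl_frame' (a :: b :: T) (x :: M) _ _ _, foldl_frame' T M _ _ _]
      simp only [show j + 2 + 1 = j + 1 + 2 by omega, show k + 2 = k + 1 + 1 by omega]
      rw [ih (j + 1) (k + 1)]
    · have h1 : Astep (a :: b :: T) (x :: M) ([], k + 1) (j + 2) = ([T.getD j 0], k + 1) := by
        simp only [Astep, hget, hpar]
        rw [if_neg (by simp only [List.length_cons]; rintro ⟨ha, hb⟩; exact hc ⟨ha, by omega⟩)]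
        simp
      have h2 : Astep T M ([], k) j = ([T.getD j 0], k) := by
        simp only [Astep]
        rw [if_neg hc]
        simp
      rw [h1, h2, foldl_frame' (a :: b :: T) (x :: M) _ _ _, foldl_frame' T M _ _ _]
      simp only [show j + 2 + 1 = j + 1 + 2 by omega]
      rw [ih (j + 1) k]

-- with no mistakes left, A's fold just copies the indexed targets
theorem Anomistakes (t : List Int) :
    ∀ (n j k : Nat),
      ((List.range' j n).foldl (Astep t []) ([], k)).1
        = (List.range' j n).map (fun i => t.getD i 0) := by
  intro n
  induction n with
  | zero => intro j k; simp
  | succ n ih =>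
    intro j k
    rw [List.range'_succ]
    simp only [List.foldl_cons, List.map_cons]
    have h1 : Astep t [] ([], k) j = ([t.getD j 0], k) := by
      simp [Astep]
    rw [h1, foldl_frame']
    simp [ih (j + 1) k]

theorem map_getD_range (t : List Int) :
    (List.range t.length).map (fun i => t.getD i 0) = t := by
  apply List.ext_getElem
  · simp
  · intro i h1 h2
    simp only [List.getElem_map, List.getElem_range]
    rw [List.getD_eq_getElem t 0 (by simpa using h2)]

-- B's accumulator is a pure prefix
theorem Bloop_frame (t : List Int) :
    ∀ (ms acc : List Int) (ti : Nat), Bloop t ms acc ti = acc ++ Bloop t ms [] ti := by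
  intro ms
  induction ms with
  | nil => intro acc ti; simp [Bloop]
  | cons x rest ih =>
    intro acc ti
    simp only [Bloop]
    split_ifs with h
    · simp
    · rw [ih (acc ++ _ ++ [x]), ih (([] : List Int) ++ _ ++ [x])]
      simp

-- dropping the first target pair shifts B's cursor by 2
theorem Bloop_shift (a b : Int) (T : List Int) :
    ∀ (ms : List Int) (ti : Nat), Bloop (a :: b :: T) ms [] (ti + 2) = Bloop T ms [] ti := by
  intro ms
  induction ms with
  | nil =>
    intro ti
    simp only [Bloop, slice_tail]
    simp
  | cons x rest ih =>
    intro ti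
    simp only [Bloop, slice_tail, slice_pair, List.length_cons]
    have hlen : (T.length + 1 + 1 < ti + 2 + 2) ↔ (T.length < ti + 2) := by omega
    rw [if_congr hlen rfl rfl]
    split_ifs with h
    · simp
    · rw [Bloop_frame, Bloop_frame T]
      have hdrop : (a :: b :: T).drop (ti + 2) = T.drop ti := by simp
      rw [show ti + 2 + 2 = (ti + 2) + 2 from rfl, ih (ti + 2)]
      simp [hdrop]

theorem main_eq (t m : List Int) : combine_timestamps t m = combine_timestamps_alt t m := by
  match t, m with
  | t, [] =>
    simp only [combine_timestamps, combine_timestamps_alt, Bloop, slice_tail]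
    rw [List.range_eq_range', Anomistakes t t.length 0 0, ← List.range_eq_range',
      map_getD_range]
    simp
  | [], x :: M =>
    simp [combine_timestamps, combine_timestamps_alt, Bloop]
  | [a], x :: M =>
    simp [combine_timestamps, combine_timestamps_alt, Bloop, Astep]
  | a :: b :: T, x :: M =>
    have IH := main_eq T M
    -- A side: two explicit steps, then the shift lemma
    have hA : combine_timestamps (a :: b :: T) (x :: M)
        = [a, b, x] ++ combine_timestamps T M := by
      simp only [combine_timestamps, List.length_cons, List.range_eq_range']
      rw [show T.length + 1 + 1 = T.length + 2 from rfl, List.range'_succ, List.range'_succ]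
      simp only [List.foldl_cons]
      have h0 : Astep (a :: b :: T) (x :: M) ([], 0) 0 = ([a], 0) := by
        simp [Astep]
      have h1 : Astep (a :: b :: T) (x :: M) ([a], 0) 1 = ([a, b, x], 1) := by
        simp [Astep]
      rw [h0, h1, foldl_frame']
      have hsh := Ashift a b x T M T.length 0 0
      simp only [show (0 : Nat) + 1 + 1 = 0 + 2 from rfl, show (0 : Nat) + 1 = 1 from rfl] at hsh ⊢
      rw [hsh]
    -- B side: one explicit step, then the shift lemma
    have hB : combine_timestamps_alt (a :: b :: T) (x :: M)
        = [a, b, x] ++ combine_timestamps_alt T M := by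
      simp only [combine_timestamps_alt, Bloop]
      rw [if_neg (by simp)]
      have hsh := Bloop_shift a b T M 0
      rw [slice_pair, Bloop_frame, hsh]
      simp
    rw [hA, hB, IH]
termination_by t.length
decreasing_by simp

-- ===== VERDICT (by name: the statement is the Claim_ definition above) =====
theorem combine_timestamps_spec : Claim_equal_combine_timestamps := by
  intro t m _
  exact main_eq t m
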